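-- pv_equiv track=rewrite | github.com/grokwithrahul/fiwb | context.py | strip_boilerplate
-- ===== SOURCE A (Python) =====
-- def strip_boilerplate(text):
--     if not text:
--         return ""
--     for marker in ["<!-- This is an auto-generated", "## Summary by CodeRabbit",
--                    "<!-- end of auto-generated"]:
--         if marker in text:
--             text = text[:text.index(marker)]
--     return text.strip()
-- ===== SOURCE B (Python) =====
-- MARKERS = ["<!-- This is an auto-generated", "## Summary by CodeRabbit",
--            "<!-- end of auto-generated"]
--
-- def strip_boilerplate(text):
--     cut = min((i for i in (text.find(m) for m in MARKERS) if i != -1),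
--               default=len(text))
--     return text[:cut].strip()
-- ===== Notes on version B (the rewrite author's own statement) =====
-- stated objective: simpler
-- what changed: A truncates the text three times in sequence (search marker, cut, re-search the shrunken text); B computes the first-occurrence index of each marker once in the original text, cuts at the minimum index, and strips.
import Mathlib
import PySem

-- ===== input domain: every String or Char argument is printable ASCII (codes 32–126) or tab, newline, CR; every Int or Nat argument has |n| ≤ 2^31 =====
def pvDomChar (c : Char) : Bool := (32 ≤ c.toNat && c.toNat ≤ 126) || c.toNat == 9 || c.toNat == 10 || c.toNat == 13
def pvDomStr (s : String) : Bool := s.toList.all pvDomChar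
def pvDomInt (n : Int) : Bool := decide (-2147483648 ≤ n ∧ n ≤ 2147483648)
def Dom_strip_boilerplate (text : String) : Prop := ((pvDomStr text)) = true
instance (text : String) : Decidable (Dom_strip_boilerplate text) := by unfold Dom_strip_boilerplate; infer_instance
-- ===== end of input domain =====

-- B replaces A's three sequential truncate-and-rescan passes by one cut at the minimum
-- first-occurrence index of any marker (objective: alternative / more idiomatic).

-- ===== PORT A =====
def strip_boilerplate (text : String) : String :=
  if text = "" then ""
  else
    PySem.Str.strip
      ((["<!-- This is an auto-generated", "## Summary by CodeRabbit",
         "<!-- end of auto-generated"] : List String).foldl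
        (fun t marker =>
          if PySem.Str.isIn marker t then
            PySem.Str.slice t none (some (PySem.Str.find t marker))
          else t) text)

-- ===== PORT B =====
def pvMarkers : List String :=
  ["<!-- This is an auto-generated", "## Summary by CodeRabbit",
   "<!-- end of auto-generated"]

def strip_boilerplate_alt (text : String) : String :=
  let hits := (pvMarkers.map (fun m => PySem.Str.find text m)).filter (fun i => i ≠ -1)
  let cut := PySem.List.minD hits (fun i => i) (PySem.Str.len text)
  PySem.Str.strip (PySem.Str.slice text none (some cut))

-- ===== PRECONDITION & SPEC =====
def Spec_strip_boilerplate (text : String) (out : String) : Prop := out = strip_boilerplate_alt text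
instance (text : String) (out : String) : Decidable (Spec_strip_boilerplate text out) := by unfold Spec_strip_boilerplate; infer_instance

-- ===== CLAIM (what is proved, stated in full; the proofs are below) =====
def Claim_equal_strip_boilerplate : Prop := ∀ (text : String), Dom_strip_boilerplate text → Spec_strip_boilerplate text (strip_boilerplate text)

-- ===== LEMMAS AND PROOFS =====

-- an occurrence of a nonempty pattern fits inside the string
lemma pvOccFits {s m : List Char} {i : Nat} (hm : m ≠ []) (h : m <+: s.drop i) :
    i + m.length ≤ s.length := by
  have h1 : m.length ≤ (s.drop i).length := h.length_le
  have h2 : 0 < m.length := List.length_pos_iff.mpr hm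
  simp [List.length_drop] at h1
  omega

-- occurrence inside a take-prefix = occurrence that ends before the cut
lemma pvPrefixTake {m s : List Char} {c i : Nat} (hm : m ≠ []) :
    m <+: (s.take c).drop i ↔ m <+: s.drop i ∧ i + m.length ≤ c := by
  have h2 : 0 < m.length := List.length_pos_iff.mpr hm
  rw [List.drop_take, List.prefix_take_iff]
  constructor
  · rintro ⟨h, hl⟩; exact ⟨h, by omega⟩
  · rintro ⟨h, hl⟩; exact ⟨h, by omega⟩

-- if an occurrence of m straddles position c and some string ch :: rest starts at c,
-- then ch occurs in m at a positive offset
lemma pvStraddleHead {s m rest : List Char} {ch : Char} {c i : Nat}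
    (hP : (ch :: rest) <+: s.drop c)
    (hM : m <+: s.drop i) (h1 : i < c) (h2 : c < i + m.length) :
    ch ∈ m.drop 1 := by
  obtain ⟨t, ht⟩ := hM
  obtain ⟨u, hu⟩ := hP
  have hc : s[c]? = some ch := by
    have : (s.drop c)[0]? = s[c + 0]? := List.getElem?_drop
    rw [← hu] at this
    simpa using this.symm
  have hm : s[c]? = m[c - i]? := by
    have hd : (s.drop i)[c - i]? = s[i + (c - i)]? := List.getElem?_drop
    rw [← ht] at hd
    have : i + (c - i) = c := by omega
    rw [this] at hd
    rw [← hd, List.getElem?_append_left (by omega)]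
  have hmem : (m.drop 1)[c - i - 1]? = some ch := by
    have hd : (m.drop 1)[c - i - 1]? = m[1 + (c - i - 1)]? := List.getElem?_drop
    have : 1 + (c - i - 1) = c - i := by omega
    rw [this] at hd
    rw [hd, ← hm, hc]
  exact List.mem_of_getElem? hmem

-- find on a truncated string, when no occurrence straddles the cut
lemma pvFindTake (s m : List Char) (c : Nat) (hm : m ≠ [])
    (hstr : ∀ i, m <+: s.drop i → i + m.length ≤ c ∨ c ≤ i) :
    PySem.Chars.find (s.take c) m =
      if 0 ≤ PySem.Chars.find s m ∧ PySem.Chars.find s m < (c : Int) then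
        PySem.Chars.find s m else -1 := by
  have h2 : 0 < m.length := List.length_pos_iff.mpr hm
  split_ifs with h
  · obtain ⟨hpos, hlt⟩ := h
    obtain ⟨hocc, hmin⟩ := PySem.Chars.find_spec hpos
    set j := (PySem.Chars.find s m).toNat with hj
    have hjc : j < c := by omega
    have hfit : j + m.length ≤ c := by
      rcases hstr j hocc with h | h
      · exact h
      · omega
    have hocc' : m <+: (s.take c).drop j := (pvPrefixTake hm).mpr ⟨hocc, hfit⟩
    have hnn : 0 ≤ PySem.Chars.find (s.take c) m := by
      rw [PySem.Chars.find_nonneg_iff, ← PySem.Chars.isIn_iff_infix,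
        ← PySem.Chars.exists_prefix_drop_iff_isIn]
      exact ⟨j, hocc'⟩
    obtain ⟨kocc, kmin⟩ := PySem.Chars.find_spec hnn
    set k := (PySem.Chars.find (s.take c) m).toNat with hk
    have hks : m <+: s.drop k := ((pvPrefixTake hm).mp kocc).1
    have h1 : ¬ j < k := fun hlt' => kmin j hlt' hocc'
    have h2' : ¬ k < j := fun hlt' => hmin k hlt' hks
    have : k = j := by omega
    omega
  · rw [PySem.Chars.find_eq_neg_one_iff]
    intro hinf
    have : PySem.Chars.isIn m (s.take c) = true := (PySem.Chars.isIn_iff_infix _ _).mpr hinf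
    obtain ⟨i, hi⟩ := (PySem.Chars.exists_prefix_drop_iff_isIn m (s.take c)).mpr this
    obtain ⟨hocc, hfit⟩ := (pvPrefixTake hm).mp hi
    have hnn : 0 ≤ PySem.Chars.find s m := by
      rw [PySem.Chars.find_nonneg_iff, ← PySem.Chars.isIn_iff_infix,
        ← PySem.Chars.exists_prefix_drop_iff_isIn]
      exact ⟨i, hocc⟩
    obtain ⟨_, hmin⟩ := PySem.Chars.find_spec hnn
    have h3 : ¬ i < (PySem.Chars.find s m).toNat := fun hlt' => hmin i hlt' hocc
    push Not at h
    have := h hnn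
    omega

-- the char-level step A performs for one marker
def pvStep (t m : List Char) : List Char :=
  if 0 ≤ PySem.Chars.find t m then t.take (PySem.Chars.find t m).toNat else t

-- the natural cut position a marker induces on s
def pvCut (s m : List Char) : Nat :=
  if 0 ≤ PySem.Chars.find s m then (PySem.Chars.find s m).toNat else s.length

lemma pvStep_eq_take (t m : List Char) : pvStep t m = t.take (pvCut t m) := by
  unfold pvStep pvCut
  split_ifs with h
  · rfl
  · simp

-- find in s.take c, c a no-straddle cut, expressed through pvCut
lemma pvCut_take (s m : List Char) (c : Nat) (hm : m ≠ [])
    (hstr : ∀ i, m <+: s.drop i → i + m.length ≤ c ∨ c ≤ i) :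
    pvCut (s.take c) m = min c (pvCut s m) := by
  unfold pvCut
  rw [pvFindTake s m c hm hstr]
  have hle := PySem.Chars.find_le_length s m
  have hge := PySem.Chars.neg_one_le_find s m
  simp only [List.length_take]
  split_ifs with h h1 <;> omega

-- no occurrence of m straddles c when either c = s.length, or some string with
-- head ch ∉ m.drop 1 starts at c
lemma pvNoStraddle_len (s m : List Char) (hm : m ≠ []) :
    ∀ i, m <+: s.drop i → i + m.length ≤ s.length ∨ s.length ≤ i :=
  fun i h => Or.inl (pvOccFits hm h)

lemma pvNoStraddle_head {s m rest : List Char} {ch : Char} {c : Nat}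
    (hP : (ch :: rest) <+: s.drop c) (hch : ch ∉ m.drop 1) :
    ∀ i, m <+: s.drop i → i + m.length ≤ c ∨ c ≤ i := by
  intro i h
  by_contra hcon
  push Not at hcon
  exact hch (pvStraddleHead hP h (by omega) (by omega))

-- occurrence at pvCut: if the cut is not the length, the marker starts there
lemma pvCut_occ (s m : List Char) (h : pvCut s m ≠ s.length) :
    m <+: s.drop (pvCut s m) := by
  unfold pvCut at *
  split_ifs at * with hf
  · exact (PySem.Chars.find_spec hf).1
  · omega

-- ===== the three markers, char level =====
def pvL1 : List Char := ("<!-- This is an auto-generated" : String).toList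
def pvL2 : List Char := ("## Summary by CodeRabbit" : String).toList
def pvL3 : List Char := ("<!-- end of auto-generated" : String).toList

lemma pvMinD (F1 F2 F3 : Int) (n : Nat) (h1 : -1 ≤ F1) (h1' : F1 ≤ (n:Int))
    (h2 : -1 ≤ F2) (h2' : F2 ≤ (n:Int)) (h3 : -1 ≤ F3) (h3' : F3 ≤ (n:Int)) :
    (PySem.List.minD (([F1, F2, F3]).filter (fun i => i ≠ -1)) (fun i => i) (n : Int)).toNat
      = min (min (if 0 ≤ F1 then F1.toNat else n) (if 0 ≤ F2 then F2.toNat else n))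
          (if 0 ≤ F3 then F3.toNat else n) := by
  by_cases e1 : F1 = -1 <;> by_cases e2 : F2 = -1 <;> by_cases e3 : F3 = -1
  · have hf : ([F1, F2, F3]).filter (fun i => i ≠ -1) = [] := by simp [e1, e2, e3]
    rw [hf]; simp [PySem.List.minD, PySem.List.min?]; split_ifs <;> omega
  · have hf : ([F1, F2, F3]).filter (fun i => i ≠ -1) = [F3] := by simp [e1, e2, e3]
    rw [hf]; simp [PySem.List.minD, PySem.List.min?_id_cons]; split_ifs <;> omega
  · have hf : ([F1, F2, F3]).filter (fun i => i ≠ -1) = [F2] := by simp [e1, e2, e3]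
    rw [hf]; simp [PySem.List.minD, PySem.List.min?_id_cons]; split_ifs <;> omega
  · have hf : ([F1, F2, F3]).filter (fun i => i ≠ -1) = [F2, F3] := by simp [e1, e2, e3]
    rw [hf]; simp [PySem.List.minD, PySem.List.min?_id_cons]; split_ifs <;> omega
  · have hf : ([F1, F2, F3]).filter (fun i => i ≠ -1) = [F1] := by simp [e1, e2, e3]
    rw [hf]; simp [PySem.List.minD, PySem.List.min?_id_cons]; split_ifs <;> omega
  · have hf : ([F1, F2, F3]).filter (fun i => i ≠ -1) = [F1, F3] := by simp [e1, e2, e3]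
    rw [hf]; simp [PySem.List.minD, PySem.List.min?_id_cons]; split_ifs <;> omega
  · have hf : ([F1, F2, F3]).filter (fun i => i ≠ -1) = [F1, F2] := by simp [e1, e2, e3]
    rw [hf]; simp [PySem.List.minD, PySem.List.min?_id_cons]; split_ifs <;> omega
  · have hf : ([F1, F2, F3]).filter (fun i => i ≠ -1) = [F1, F2, F3] := by simp [e1, e2, e3]
    rw [hf]; simp [PySem.List.minD, PySem.List.min?_id_cons]; split_ifs <;> omega

-- one String-level pass of A, expressed through pvStep on char lists
lemma pvStepStr (t m : String) :
    (if PySem.Str.isIn m t then PySem.Str.slice t none (some (PySem.Str.find t m)) else t).toList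
      = pvStep t.toList m.toList := by
  unfold pvStep
  by_cases h : PySem.Str.isIn m t = true
  · have hf : 0 ≤ PySem.Chars.find t.toList m.toList :=
      (PySem.Chars.find_nonneg_iff _ _).mpr ((PySem.Str.isIn_iff_infix m t).mp h)
    rw [if_pos h, if_pos hf, PySem.Str.toList_slice, PySem.Chars.slice_eq_listSlice,
      PySem.Str.find_eq]
    exact PySem.List.slice_to _ hf
  · have hf : ¬ 0 ≤ PySem.Chars.find t.toList m.toList := fun hge =>
      h ((PySem.Str.isIn_iff_infix m t).mpr ((PySem.Chars.find_nonneg_iff _ _).mp hge))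
    rw [if_neg h, if_neg hf]

lemma pvMain (s : List Char) :
    pvStep (pvStep (pvStep s pvL1) pvL2) pvL3 =
      s.take ((PySem.List.minD
        (([PySem.Chars.find s pvL1, PySem.Chars.find s pvL2,
           PySem.Chars.find s pvL3]).filter (fun i => i ≠ -1))
        (fun i => i) (s.length : Int)).toNat) := by
  have hne1 : pvL1 ≠ [] := by decide
  have hne2 : pvL2 ≠ [] := by decide
  have hne3 : pvL3 ≠ [] := by decide
  have hstr2 : ∀ i, pvL2 <+: s.drop i → i + pvL2.length ≤ pvCut s pvL1 ∨ pvCut s pvL1 ≤ i := by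
    by_cases hE : pvCut s pvL1 = s.length
    · rw [hE]; exact pvNoStraddle_len s pvL2 hne2
    · have hocc := pvCut_occ s pvL1 hE
      have he : pvL1 = '<' :: pvL1.tail := by decide
      rw [he] at hocc
      exact pvNoStraddle_head hocc (by decide)
  have hstr3 : ∀ i, pvL3 <+: s.drop i →
      i + pvL3.length ≤ min (pvCut s pvL1) (pvCut s pvL2) ∨
        min (pvCut s pvL1) (pvCut s pvL2) ≤ i := by
    by_cases hE : min (pvCut s pvL1) (pvCut s pvL2) = s.length
    · rw [hE]; exact pvNoStraddle_len s pvL3 hne3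
    · rcases le_total (pvCut s pvL1) (pvCut s pvL2) with hle | hle
      · have hmin : min (pvCut s pvL1) (pvCut s pvL2) = pvCut s pvL1 := by omega
        rw [hmin] at hE ⊢
        have hocc := pvCut_occ s pvL1 hE
        have he : pvL1 = '<' :: pvL1.tail := by decide
        rw [he] at hocc
        exact pvNoStraddle_head hocc (by decide)
      · have hmin : min (pvCut s pvL1) (pvCut s pvL2) = pvCut s pvL2 := by omega
        rw [hmin] at hE ⊢
        have hocc := pvCut_occ s pvL2 hE
        have he : pvL2 = '#' :: pvL2.tail := by decide
        rw [he] at hocc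
        exact pvNoStraddle_head hocc (by decide)
  rw [pvStep_eq_take s pvL1, pvStep_eq_take (List.take (pvCut s pvL1) s) pvL2,
    pvCut_take s pvL2 (pvCut s pvL1) hne2 hstr2, List.take_take]
  have hm12 : min (min (pvCut s pvL1) (pvCut s pvL2)) (pvCut s pvL1)
      = min (pvCut s pvL1) (pvCut s pvL2) := by omega
  rw [hm12, pvStep_eq_take,
    pvCut_take s pvL3 (min (pvCut s pvL1) (pvCut s pvL2)) hne3 hstr3,
    List.take_take]
  have hm123 : min (min (min (pvCut s pvL1) (pvCut s pvL2)) (pvCut s pvL3))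
      (min (pvCut s pvL1) (pvCut s pvL2))
      = min (min (pvCut s pvL1) (pvCut s pvL2)) (pvCut s pvL3) := by omega
  rw [hm123, pvMinD (PySem.Chars.find s pvL1) (PySem.Chars.find s pvL2)
    (PySem.Chars.find s pvL3) s.length
    (PySem.Chars.neg_one_le_find s pvL1) (PySem.Chars.find_le_length s pvL1)
    (PySem.Chars.neg_one_le_find s pvL2) (PySem.Chars.find_le_length s pvL2)
    (PySem.Chars.neg_one_le_find s pvL3) (PySem.Chars.find_le_length s pvL3)]
  rfl

-- ===== VERDICT (by name: the statement is the Claim_ definition above) =====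
theorem strip_boilerplate_spec : Claim_equal_strip_boilerplate := by
  intro text _
  unfold Spec_strip_boilerplate
  by_cases h : text = ""
  · subst h; decide
  · unfold strip_boilerplate strip_boilerplate_alt pvMarkers
    rw [if_neg h]
    simp only [List.foldl_cons, List.foldl_nil, List.map_cons, List.map_nil]
    have hcut : 0 ≤ PySem.List.minD
        (([PySem.Str.find text "<!-- This is an auto-generated",
           PySem.Str.find text "## Summary by CodeRabbit",
           PySem.Str.find text "<!-- end of auto-generated"]).filter (fun i => i ≠ -1))
        (fun i => i) (PySem.Str.len text) := by
      unfold PySem.List.minD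
      rcases hmin : PySem.List.min?
          (([PySem.Str.find text "<!-- This is an auto-generated",
             PySem.Str.find text "## Summary by CodeRabbit",
             PySem.Str.find text "<!-- end of auto-generated"]).filter (fun i => i ≠ -1))
          (fun i => i) with _ | m
      · rw [hmin, Option.getD_none, PySem.Str.len_eq]
        positivity
      · have hm := PySem.List.min?_mem hmin
        rw [List.mem_filter] at hm
        obtain ⟨hmem, hne⟩ := hm
        rw [hmin, Option.getD_some]
        have g1 := PySem.Chars.neg_one_le_find text.toList
          ("<!-- This is an auto-generated" : String).toList
        have g2 := PySem.Chars.neg_one_le_find text.toList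
          ("## Summary by CodeRabbit" : String).toList
        have g3 := PySem.Chars.neg_one_le_find text.toList
          ("<!-- end of auto-generated" : String).toList
        rw [PySem.Str.find_eq, PySem.Str.find_eq, PySem.Str.find_eq] at hmem
        simp only [List.mem_cons, List.not_mem_nil, or_false] at hmem
        have hne' : m ≠ -1 := by simpa using hne
        rcases hmem with hm' | hm' | hm' <;> subst hm' <;> omega
    refine congrArg PySem.Str.strip (String.ext ?_)
    rw [pvStepStr, pvStepStr, pvStepStr, PySem.Str.toList_slice,
      PySem.Chars.slice_eq_listSlice, PySem.List.slice_to _ hcut]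
    simp only [PySem.Str.find_eq, PySem.Str.len_eq]
    exact pvMain text.toList
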